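-- pv_equiv track=rewrite | github.com/deadlylover/umamusume-auto-train | core/trackblazer_item_use.py | _hammer_usage_state
-- ===== SOURCE A (Python) =====
-- _HAMMER_TIERS = (
--   "master_cleat_hammer",
--   "artisan_cleat_hammer",
-- )
--
-- def _safe_int(value, default=0):
--   try:
--     return int(value)
--   except (TypeError, ValueError):
--     return default
--
-- def _hammer_usage_state(held_quantities):
--   tiers = []
--   for item_key in _HAMMER_TIERS:
--     tiers.extend([item_key] * max(0, _safe_int(held_quantities.get(item_key), 0)))
--   reserved = tiers[:3]
--   spendable = tiers[3:]
--   reserved_counts = {item_key: reserved.count(item_key) for item_key in _HAMMER_TIERS}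
--   spendable_counts = {item_key: spendable.count(item_key) for item_key in _HAMMER_TIERS}
--   return reserved_counts, spendable_counts
-- ===== SOURCE B (Python) =====
-- _HAMMER_TIERS = (
--   "master_cleat_hammer",
--   "artisan_cleat_hammer",
-- )
--
-- def _safe_int(value, default=0):
--   try:
--     return int(value)
--   except (TypeError, ValueError):
--     return default
--
-- def _hammer_usage_state(held_quantities):
--   # Arithmetic slot-filling per tier instead of materialising one list
--   # element per held hammer.
--   slots = 3
--   reserved_counts = {}
--   spendable_counts = {}
--   for item_key in _HAMMER_TIERS:
--     qty = max(0, _safe_int(held_quantities.get(item_key), 0))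
--     take = min(slots, qty)
--     slots -= take
--     reserved_counts[item_key] = take
--     spendable_counts[item_key] = qty - take
--   return reserved_counts, spendable_counts
-- ===== Notes on version B (the rewrite author's own statement) =====
-- stated objective: alternative
-- what changed: B fills the 3 reserved slots arithmetically per tier (min/subtract running slot counter) instead of materialising a list with one element per held hammer and slicing/counting it.
import Mathlib
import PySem

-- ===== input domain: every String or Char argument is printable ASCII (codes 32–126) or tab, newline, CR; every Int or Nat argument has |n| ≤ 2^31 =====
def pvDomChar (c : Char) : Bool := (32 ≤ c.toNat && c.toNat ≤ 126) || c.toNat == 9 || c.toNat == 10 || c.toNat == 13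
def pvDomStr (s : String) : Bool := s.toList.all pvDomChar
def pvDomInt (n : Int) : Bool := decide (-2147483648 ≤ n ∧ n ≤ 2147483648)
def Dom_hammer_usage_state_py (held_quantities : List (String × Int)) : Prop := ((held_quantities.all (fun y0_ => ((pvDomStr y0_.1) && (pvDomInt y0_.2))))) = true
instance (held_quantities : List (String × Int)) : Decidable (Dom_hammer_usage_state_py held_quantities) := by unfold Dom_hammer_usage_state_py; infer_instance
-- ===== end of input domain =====

-- B replaces A's "materialise one list element per held hammer, slice, count" with
-- arithmetic slot filling per tier (a running slot counter with min/subtract).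

-- ===== PORT A =====
def pvHammerTiers : List String := ["master_cleat_hammer", "artisan_cleat_hammer"]

-- _safe_int(held_quantities.get(k), 0): the value is already an int, None -> 0
def pvSafeGet (hq : List (String × Int)) (k : String) : Int :=
  ((PySem.Dict.mk hq).get? k).getD 0

def hammer_usage_state_py (held_quantities : List (String × Int)) : (List (String × Int)) × (List (String × Int)) :=
  let tiers := pvHammerTiers.foldl
    (fun acc item_key => acc ++ List.replicate (max 0 (pvSafeGet held_quantities item_key)).toNat item_key) []
  let reserved := PySem.List.slice tiers none (some 3)
  let spendable := PySem.List.slice tiers (some 3) none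
  let reserved_counts := pvHammerTiers.map (fun item_key => (item_key, (reserved.count item_key : Int)))
  let spendable_counts := pvHammerTiers.map (fun item_key => (item_key, (spendable.count item_key : Int)))
  (reserved_counts, spendable_counts)

-- ===== PORT B =====
def hammer_usage_state_py_alt (held_quantities : List (String × Int)) : (List (String × Int)) × (List (String × Int)) :=
  let st := pvHammerTiers.foldl
    (fun (st : Int × List (String × Int) × List (String × Int)) item_key =>
      let qty := max 0 (((PySem.Dict.mk held_quantities).get? item_key).getD 0)
      let take := min st.1 qty
      (st.1 - take, st.2.1 ++ [(item_key, take)], st.2.2 ++ [(item_key, qty - take)]))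
    (3, [], [])
  (st.2.1, st.2.2)

-- ===== PRECONDITION & SPEC =====
def Spec_hammer_usage_state_py (held_quantities : List (String × Int)) (out : (List (String × Int)) × (List (String × Int))) : Prop := out = hammer_usage_state_py_alt held_quantities
instance (held_quantities : List (String × Int)) (out : (List (String × Int)) × (List (String × Int))) : Decidable (Spec_hammer_usage_state_py held_quantities out) := by unfold Spec_hammer_usage_state_py; infer_instance

-- ===== CLAIM (what is proved, stated in full; the proofs are below) =====
def Claim_equal_hammer_usage_state_py : Prop := ∀ (held_quantities : List (String × Int)), Dom_hammer_usage_state_py held_quantities → Spec_hammer_usage_state_py held_quantities (hammer_usage_state_py held_quantities)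

-- ===== LEMMAS AND PROOFS =====

-- ===== VERDICT (by name: the statement is the Claim_ definition above) =====
theorem hammer_usage_state_py_spec : Claim_equal_hammer_usage_state_py := by
  intro hq _
  unfold Spec_hammer_usage_state_py hammer_usage_state_py hammer_usage_state_py_alt
  simp only [pvHammerTiers, List.foldl, List.map, List.nil_append]
  rw [show (3:Int) = ((3:Nat):Int) from rfl, PySem.List.slice_to_natCast, PySem.List.slice_from_natCast]
  rw [List.take_append, List.drop_append]
  simp only [List.take_replicate, List.drop_replicate, List.count_replicate, List.count_append,
    List.length_replicate]
  simp only [pvSafeGet, Prod.mk.injEq, beq_iff_eq, String.reduceEq, reduceIte,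
    List.singleton_append, List.cons.injEq, and_true, true_and]
  omega
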